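-- pv_equiv track=rewrite | github.com/AndiRiswanda/Ravenly | Tugas lab/Tugas Lab Week 7 (Kasir Sederhana)/Kasir_SederhanaT.py | InisialCapital
-- ===== SOURCE A (Python) =====
-- def InisialCapital(kata):
--     kata = kata.title()
--     kata = [x for x in kata if x.isupper()]
--
--     if len(kata) < 3:
--         for i in range(3-len(kata)):
--             kata.append(kata[-1])
--     kata = "".join(kata)
--
--     if len(kata) > 3:
--         kata = kata[0:3]
--     return kata
-- ===== SOURCE B (Python) =====
-- def InisialCapital(kata):
--     # single pass: collect the uppercased first letter of each alphabetic run
--     initials = []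
--     prev_alpha = False
--     for c in kata:
--         a = c.isalpha()
--         if a and not prev_alpha:
--             initials.append(c.upper())
--         prev_alpha = a
--     s = "".join(initials)
--     return s.ljust(3, s[-1])[:3]
-- ===== Notes on version B (the rewrite author's own statement) =====
-- stated objective: simpler
-- what changed: B replaces A's three-pass pipeline (title-case whole string, filter uppercase chars, then a length-check branch with an append loop and a truncation branch) by a single pass collecting the uppercased first letter of each alphabetic run followed by one branchless ljust/slice expression.
import Mathlib
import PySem

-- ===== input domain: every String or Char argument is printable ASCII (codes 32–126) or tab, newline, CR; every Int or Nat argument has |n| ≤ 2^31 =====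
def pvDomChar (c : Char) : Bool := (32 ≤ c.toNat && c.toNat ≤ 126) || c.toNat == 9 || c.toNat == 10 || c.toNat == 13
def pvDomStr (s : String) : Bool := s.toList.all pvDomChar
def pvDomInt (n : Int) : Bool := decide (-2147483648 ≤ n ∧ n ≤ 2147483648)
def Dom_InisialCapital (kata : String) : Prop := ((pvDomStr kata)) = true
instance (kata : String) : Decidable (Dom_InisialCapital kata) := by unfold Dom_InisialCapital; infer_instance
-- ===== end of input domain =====

-- B replaces A's title/filter/pad-loop/truncate pipeline by one pass collecting the word
-- initials plus a single branchless ljust/slice expression ("simpler"); return value only.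

-- ===== PORT A =====
-- str.title(), char by char (exact on the ASCII domain: a char is cased iff it is a letter):
-- uppercase a letter whose predecessor is not cased, lowercase the other letters.
def pvTitle : Bool → List Char → List Char
  | _, [] => []
  | prev, c :: cs =>
      (if PySem.Chars.isalpha c then
        (if prev then PySem.Chars.lowerChar c else PySem.Chars.upperChar c)
       else c) :: pvTitle (PySem.Chars.isalpha c) cs

-- the 'for i in range(3-len(kata)): kata.append(kata[-1])' loop; the .getD ' ' is only
-- reached where Python raises IndexError (no letters), which Pre_ excludes
def pvPad : Nat → List Char → List Char
  | 0, l => l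
  | n + 1, l => pvPad n (l ++ [(PySem.List.pyGet? l (-1)).getD ' '])

def InisialCapital (kata : String) : String :=
  let t := pvTitle false kata.toList
  let l := t.filter (fun x => PySem.Chars.isupper x)
  let l2 := if l.length < 3 then pvPad (3 - l.length) l else l
  if l2.length > 3 then String.mk (PySem.List.slice l2 (some 0) (some 3)) else String.mk l2

-- ===== PORT B =====
-- one pass: the uppercased first letter of each alphabetic run
def pvInitials : Bool → List Char → List Char
  | _, [] => []
  | prev, c :: cs =>
      if PySem.Chars.isalpha c && !prev then PySem.Chars.upperChar c :: pvInitials true cs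
      else pvInitials (PySem.Chars.isalpha c) cs

def InisialCapital_alt (kata : String) : String :=
  let s := pvInitials false kata.toList
  -- s[-1]; the .getD ' ' is only reached where Python raises IndexError (excluded by Pre_)
  let fill := (PySem.List.pyGet? s (-1)).getD ' '
  String.mk ((s ++ List.replicate (3 - s.length) fill).take 3)

-- ===== PRECONDITION & SPEC =====
-- Pre_ excludes exactly the strings without any ASCII letter: there both Pythons raise
-- IndexError (A on kata[-1] of the empty initials list, B on s[-1]).
def Pre_InisialCapital (kata : String) : Prop :=
  (kata.toList.any (fun c => PySem.Chars.isalpha c)) = true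
instance (kata : String) : Decidable (Pre_InisialCapital kata) := by
  unfold Pre_InisialCapital; infer_instance
def pvWitness_InisialCapital : String := "abc de"

def Spec_InisialCapital (kata : String) (out : String) : Prop := out = InisialCapital_alt kata
instance (kata : String) (out : String) : Decidable (Spec_InisialCapital kata out) := by unfold Spec_InisialCapital; infer_instance

-- ===== CLAIM (what is proved, stated in full; the proofs are below) =====
def Claim_equal_InisialCapital : Prop := ∀ (kata : String), Dom_InisialCapital kata → Pre_InisialCapital kata → Spec_InisialCapital kata (InisialCapital kata)

-- ===== LEMMAS AND PROOFS =====

theorem charLeNat (a b : Char) : (a ≤ b) ↔ (a.toNat ≤ b.toNat) := by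
  rw [Char.le_def, UInt32.le_iff_toNat_le, Char.toNat_val, Char.toNat_val]

theorem isupper_upperChar (c : Char) (h : PySem.Chars.isalpha c = true) :
    PySem.Chars.isupper (PySem.Chars.upperChar c) = true := by
  simp only [PySem.Chars.isalpha, PySem.Chars.isupper, PySem.Chars.islower,
    PySem.Chars.upperChar, charLeNat, Bool.or_eq_true, Bool.and_eq_true, decide_eq_true_eq,
    show ('A').toNat = 65 from rfl, show ('Z').toNat = 90 from rfl,
    show ('a').toNat = 97 from rfl, show ('z').toNat = 122 from rfl] at *
  split_ifs with hl
  · rw [Char.toNat_ofNat]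
    have hv : (c.toNat - 32).isValidChar := Or.inl (by omega)
    simp [hv]; omega
  · omega

theorem not_isupper_lowerChar (c : Char) (h : PySem.Chars.isalpha c = true) :
    PySem.Chars.isupper (PySem.Chars.lowerChar c) = false := by
  simp only [PySem.Chars.isalpha, PySem.Chars.isupper, PySem.Chars.islower,
    PySem.Chars.lowerChar, charLeNat, Bool.or_eq_true, Bool.and_eq_true, decide_eq_true_eq,
    Bool.and_eq_false_iff, decide_eq_false_iff_not, not_le,
    show ('A').toNat = 65 from rfl, show ('Z').toNat = 90 from rfl,
    show ('a').toNat = 97 from rfl, show ('z').toNat = 122 from rfl] at *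
  split_ifs with hl
  · rw [Char.toNat_ofNat]
    have hv : (c.toNat + 32).isValidChar := Or.inl (by omega)
    simp [hv]; omega
  · omega

theorem not_isupper_of_not_alpha (c : Char) (h : PySem.Chars.isalpha c = false) :
    PySem.Chars.isupper c = false := by
  simp [PySem.Chars.isalpha] at h
  exact h.1

theorem filter_title_eq (cs : List Char) : ∀ prev,
    (pvTitle prev cs).filter (fun x => PySem.Chars.isupper x) = pvInitials prev cs := by
  induction cs with
  | nil => intro prev; rfl
  | cons c cs ih =>
    intro prev
    by_cases ha : PySem.Chars.isalpha c = true
    · cases prev with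
      | false =>
        simp [pvTitle, pvInitials, ha, isupper_upperChar c ha, ih]
      | true =>
        simp [pvTitle, pvInitials, ha, not_isupper_lowerChar c ha, ih]
    · simp at ha
      simp [pvTitle, pvInitials, ha, not_isupper_of_not_alpha c ha, ih]

theorem pyGet?_neg_one (l : List Char) : PySem.List.pyGet? l (-1) = l.getLast? := by
  simp only [PySem.List.pyGet?, PySem.List.pyIdx?]
  cases l with
  | nil => rfl
  | cons a t => simp [List.getLast?_eq_getElem?]

theorem pvPad_eq (n : Nat) : ∀ (l : List Char),
    pvPad n l = l ++ List.replicate n ((PySem.List.pyGet? l (-1)).getD ' ') := by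
  induction n with
  | zero => intro l; simp [pvPad]
  | succ n ih =>
    intro l
    rw [pvPad, ih]
    simp [pyGet?_neg_one, List.replicate_succ]

-- ===== VERDICT (by name: the statement is the Claim_ definition above) =====
theorem InisialCapital_spec : Claim_equal_InisialCapital := by
  intro kata _ _
  unfold Spec_InisialCapital InisialCapital InisialCapital_alt
  dsimp only
  rw [filter_title_eq]
  set s := pvInitials false kata.toList with hs
  by_cases hlen : s.length < 3
  · have h3 : 3 - s.length + s.length = 3 := by omega
    simp only [hlen, if_true, pvPad_eq]
    have hL : (s ++ List.replicate (3 - s.length) ((PySem.List.pyGet? s (-1)).getD ' ')).length = 3 := by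
      simp only [List.length_append, List.length_replicate]; omega
    rw [hL]
    simp only [show ¬ (3 > 3) by omega, if_false]
    congr 1
    rw [List.take_of_length_le (by omega)]
  · simp only [hlen, if_false]
    have h0 : 3 - s.length = 0 := by omega
    rw [h0]
    simp only [List.replicate_zero, List.append_nil]
    by_cases hgt : s.length > 3
    · simp only [hgt, if_true]
      congr 1
      simp [PySem.List.slice]
    · simp only [hgt, if_false]
      congr 1
      rw [List.take_of_length_le (by omega)]
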